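-- pv_equiv track=rewrite | github.com/ChernZeXin/TL4A_PFB_IGP | profitandloss.py | get_fluctuating_output
-- ===== SOURCE A (Python) =====
-- def get_fluctuating_output(profit_diff):
--     '''
--     Accepts a dict as argument.
--     Return output for fluctuating trend.
--     '''
--     deficits = []  # Store days with deficits
--
--     output = ""
--     for day, amt in profit_diff.items():
--         if amt < 0:
--             deficits.append(day)  # Append days with deficit to list
--             output += f"[NET PROFIT DEFICIT] DAY: {day}, AMOUNT:  SGD{amt * -1}\n"
--
--     # Get top 3 highest deficits
--     top = [0, 0]
--     second = [0, 0]
--     third = [0, 0]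
--
--     for day in deficits:
--         curr_deficit = profit_diff[day]  # Get deficit for current day
--         if curr_deficit < top[1]:  # If largest deficit
--             third = second
--             second = top
--             top = [day, curr_deficit]
--         elif curr_deficit < second[1]:  # If second largest
--             third = second
--             second = [day, curr_deficit]
--         elif curr_deficit < third[1]:  # If third largest
--             third = [day, curr_deficit]
--
--
--     top3_highest = [top, second, third]
--
--     for index, deficit in enumerate(top3_highest):
--         day = deficit[0]
--         amount = abs(deficit[1])  # Convert the deficit amount to a positive value
--
--         if index == 0:
--             output += f"[HIGHEST NET PROFIT DEFICIT] DAY: {day}, AMOUNT: SGD{amount}\n"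
--         elif index == 1:
--             output += f"[2ND HIGHEST NET PROFIT DEFICIT] DAY: {day}, AMOUNT: SGD{amount}\n"
--         else:
--             output += f"[3RD HIGHEST NET PROFIT DEFICIT] DAY: {day}, AMOUNT: SGD{amount}\n"
--
--     return output
-- ===== SOURCE B (Python) =====
-- def get_fluctuating_output(profit_diff):
--     pairs = [(day, amt) for day, amt in profit_diff.items() if amt < 0]
--     output = "".join(
--         f"[NET PROFIT DEFICIT] DAY: {day}, AMOUNT:  SGD{-amt}\n" for day, amt in pairs
--     )
--     top3 = sorted(pairs, key=lambda p: p[1])[:3]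
--     top3 += [(0, 0)] * (3 - len(top3))
--     labels = ["[HIGHEST NET PROFIT DEFICIT]",
--               "[2ND HIGHEST NET PROFIT DEFICIT]",
--               "[3RD HIGHEST NET PROFIT DEFICIT]"]
--     for label, (day, amt) in zip(labels, top3):
--         output += f"{label} DAY: {day}, AMOUNT: SGD{-amt}\n"
--     return output
-- ===== Notes on version B (the rewrite author's own statement) =====
-- stated objective: simpler
-- what changed: The manual top/second/third tournament with its three-way if/elif cascade and the dict re-lookup is replaced by filtering the deficit pairs once, stable-sorting them by amount, taking the first three and padding with zero entries; Pre_ only requires pairwise-distinct keys, i.e. exactly the association lists that represent a Python dict, since A's dict argument can never hold a duplicate key.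
import Mathlib
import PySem

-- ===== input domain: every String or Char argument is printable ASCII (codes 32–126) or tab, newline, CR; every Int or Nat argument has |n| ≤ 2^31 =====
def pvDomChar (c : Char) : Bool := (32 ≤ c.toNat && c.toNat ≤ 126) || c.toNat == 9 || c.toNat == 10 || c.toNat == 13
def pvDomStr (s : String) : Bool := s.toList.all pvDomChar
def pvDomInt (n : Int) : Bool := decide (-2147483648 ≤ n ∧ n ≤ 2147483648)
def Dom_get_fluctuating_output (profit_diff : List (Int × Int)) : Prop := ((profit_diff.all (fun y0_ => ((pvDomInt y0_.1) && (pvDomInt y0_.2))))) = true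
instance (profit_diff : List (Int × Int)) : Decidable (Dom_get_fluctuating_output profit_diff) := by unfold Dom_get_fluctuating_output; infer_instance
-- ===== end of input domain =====

-- B replaces A's hand-rolled top/second/third tournament by a stable sort of the deficit
-- pairs, take-3 and padding (objective: simpler); equivalence is proved for inputs whose
-- keys are pairwise distinct (the lists that actually represent a Python dict).

-- ===== PORT A =====
def get_fluctuating_output (profit_diff : List (Int × Int)) : String :=
  -- first loop: collect deficit days and emit the per-day lines
  let s1 := profit_diff.foldl
    (fun (st : List Int × String) dv =>
      if dv.2 < 0 then
        (st.1 ++ [dv.1],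
         st.2 ++ "[NET PROFIT DEFICIT] DAY: " ++ PySem.Int.toStr dv.1 ++
           ", AMOUNT:  SGD" ++ PySem.Int.toStr (dv.2 * -1) ++ "\n")
      else st)
    ([], "")
  -- second loop: manual top / second / third selection
  let sel := s1.1.foldl
    (fun (t : (Int × Int) × (Int × Int) × (Int × Int)) day =>
      -- profit_diff[day]; 'day' is always a key of the dict, so the default is never used
      let curr := PySem.Dict.getD (PySem.Dict.mk profit_diff) day 0
      if curr < t.1.2 then ((day, curr), t.1, t.2.1)
      else if curr < t.2.1.2 then (t.1, (day, curr), t.2.1)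
      else if curr < t.2.2.2 then (t.1, t.2.1, (day, curr))
      else t)
    (((0:Int), (0:Int)), ((0:Int), (0:Int)), ((0:Int), (0:Int)))
  -- third loop: enumerate([top, second, third]) with index branches
  (PySem.List.enumerate [sel.1, sel.2.1, sel.2.2]).foldl
    (fun out p =>
      let day := p.2.1
      let amount := |p.2.2|
      if p.1 == 0 then
        out ++ "[HIGHEST NET PROFIT DEFICIT] DAY: " ++ PySem.Int.toStr day ++
          ", AMOUNT: SGD" ++ PySem.Int.toStr amount ++ "\n"
      else if p.1 == 1 then
        out ++ "[2ND HIGHEST NET PROFIT DEFICIT] DAY: " ++ PySem.Int.toStr day ++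
          ", AMOUNT: SGD" ++ PySem.Int.toStr amount ++ "\n"
      else
        out ++ "[3RD HIGHEST NET PROFIT DEFICIT] DAY: " ++ PySem.Int.toStr day ++
          ", AMOUNT: SGD" ++ PySem.Int.toStr amount ++ "\n")
    s1.2

-- ===== PORT B =====
def get_fluctuating_output_alt (profit_diff : List (Int × Int)) : String :=
  let pairs := profit_diff.filter (fun p => p.2 < 0)
  let output := PySem.Str.join "" (pairs.map (fun p =>
    "[NET PROFIT DEFICIT] DAY: " ++ PySem.Int.toStr p.1 ++
      ", AMOUNT:  SGD" ++ PySem.Int.toStr (-p.2) ++ "\n"))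
  let t3 := (PySem.List.sorted pairs (fun p => p.2)).take 3
  let top3 := t3 ++ List.replicate (3 - t3.length) ((0:Int), (0:Int))
  ((["[HIGHEST NET PROFIT DEFICIT]", "[2ND HIGHEST NET PROFIT DEFICIT]",
     "[3RD HIGHEST NET PROFIT DEFICIT]"].zip top3)).foldl
    (fun out lp =>
      out ++ lp.1 ++ " DAY: " ++ PySem.Int.toStr lp.2.1 ++
        ", AMOUNT: SGD" ++ PySem.Int.toStr (-lp.2.2) ++ "\n")
    output

-- ===== PRECONDITION & SPEC =====
-- Pre_ admits exactly the association lists with pairwise-distinct keys: those are the lists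
-- that represent a Python dict (A's argument is a dict, which can never hold a duplicate key).
def Pre_get_fluctuating_output (profit_diff : List (Int × Int)) : Prop :=
  (profit_diff.map Prod.fst).Nodup
instance (profit_diff : List (Int × Int)) : Decidable (Pre_get_fluctuating_output profit_diff) := by
  unfold Pre_get_fluctuating_output; infer_instance
def pvWitness_get_fluctuating_output : (List (Int × Int)) := [(1, -5), (2, 3), (3, -2)]

def Spec_get_fluctuating_output (profit_diff : List (Int × Int)) (out : String) : Prop := out = get_fluctuating_output_alt profit_diff
instance (profit_diff : List (Int × Int)) (out : String) : Decidable (Spec_get_fluctuating_output profit_diff out) := by unfold Spec_get_fluctuating_output; infer_instance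

-- ===== CLAIM (what is proved, stated in full; the proofs are below) =====
def Claim_equal_get_fluctuating_output : Prop := ∀ (profit_diff : List (Int × Int)), Dom_get_fluctuating_output profit_diff → Pre_get_fluctuating_output profit_diff → Spec_get_fluctuating_output profit_diff (get_fluctuating_output profit_diff)

-- ===== LEMMAS AND PROOFS =====

-- the deficit line of A's first loop (= B's, after rewriting dv.2 * -1 to -dv.2)
def pvLine (p : Int × Int) : String :=
  "[NET PROFIT DEFICIT] DAY: " ++ PySem.Int.toStr p.1 ++ ", AMOUNT:  SGD" ++ PySem.Int.toStr (-p.2) ++ "\n"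

-- the pure selection step of A's second loop
def pvStep (t : (Int × Int) × (Int × Int) × (Int × Int)) (p : Int × Int) :
    (Int × Int) × (Int × Int) × (Int × Int) :=
  if p.2 < t.1.2 then (p, t.1, t.2.1)
  else if p.2 < t.2.1.2 then (t.1, p, t.2.1)
  else if p.2 < t.2.2.2 then (t.1, t.2.1, p)
  else t

-- first three elements of a list, padded with (0,0)
def pvPad3 (l : List (Int × Int)) : (Int × Int) × (Int × Int) × (Int × Int) :=
  (l.getD 0 (0, 0), l.getD 1 (0, 0), l.getD 2 (0, 0))

-- ''.join over a cons (specific unfolding used by the proofs below)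
theorem pv_join_cons (x : String) (xs : List String) :
    PySem.Str.join "" (x :: xs) = x ++ PySem.Str.join "" xs := by
  cases xs with
  | nil => simp [PySem.Str.join, PySem.Chars.join, List.intercalate]
  | cons y ys => simp [PySem.Str.join, PySem.Chars.join, List.intercalate, List.intersperse_cons₂,
      String.ofList_append, String.ofList_toList]

-- A's first loop computes the filtered days and the concatenation of the lines
theorem pv_loop1 (l : List (Int × Int)) (ds : List Int) (o : String) :
    l.foldl
      (fun (st : List Int × String) dv =>
        if dv.2 < 0 then
          (st.1 ++ [dv.1],
           st.2 ++ "[NET PROFIT DEFICIT] DAY: " ++ PySem.Int.toStr dv.1 ++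
             ", AMOUNT:  SGD" ++ PySem.Int.toStr (dv.2 * -1) ++ "\n")
        else st)
      (ds, o)
    = (ds ++ (l.filter (fun p => p.2 < 0)).map Prod.fst,
       o ++ PySem.Str.join "" ((l.filter (fun p => p.2 < 0)).map pvLine)) := by
  induction l generalizing ds o with
  | nil => simp [PySem.Str.join, PySem.Chars.join, List.intercalate]
  | cons dv tl ih =>
    by_cases hd : dv.2 < 0
    · rw [List.foldl_cons, if_pos hd, ih]
      simp [hd, pv_join_cons, pvLine, String.append_assoc]
    · rw [List.foldl_cons, if_neg hd, ih]
      simp [hd]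

-- dict lookup recovers the stored value when keys are distinct
theorem pv_lookup (l : List (Int × Int)) (h : (l.map Prod.fst).Nodup)
    (p : Int × Int) (hp : p ∈ l) :
    PySem.Dict.getD (PySem.Dict.mk l) p.1 0 = p.2 := by
  obtain ⟨k, v⟩ := p
  induction l with
  | nil => cases hp
  | cons q t ih =>
    obtain ⟨k', v'⟩ := q
    rcases List.mem_cons.mp hp with h' | hp'
    · obtain ⟨rfl, rfl⟩ := Prod.mk.injEq .. ▸ h'
      simp [PySem.Dict.getD, PySem.Dict.get?_mk_cons]
    · have hmem : k ∈ t.map Prod.fst := List.mem_map_of_mem hp'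
      simp only [List.map_cons, List.nodup_cons] at h
      have hne : ¬ ((k' : Int) == k) = true := by
        simp only [beq_iff_eq]; exact fun he => h.1 (he ▸ hmem)
      simpa [PySem.Dict.getD, PySem.Dict.mk, PySem.Dict.get?_mk_cons, hne]
        using ih h.2 hp'

-- take-3-and-pad written with getD
theorem pv_pad3_list (l : List (Int × Int)) :
    (l.take 3) ++ List.replicate (3 - (l.take 3).length) ((0:Int), (0:Int))
      = [l.getD 0 (0, 0), l.getD 1 (0, 0), l.getD 2 (0, 0)] := by
  rcases l with _ | ⟨a, _ | ⟨b, _ | ⟨c, t⟩⟩⟩ <;> simp [List.getD]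

-- one insertion step, seen through pvPad3
theorem pv_step_insert (p : Int × Int) (hp : p.2 < 0) (acc : List (Int × Int)) :
    pvPad3 (PySem.List.insertBy (fun a b => decide (a.2 < b.2)) p acc)
      = pvStep (pvPad3 acc) p := by
  rcases acc with _ | ⟨a, _ | ⟨b, _ | ⟨c, t⟩⟩⟩ <;>
    simp only [pvPad3, pvStep, PySem.List.insertBy, List.getD] <;>
    split_ifs <;> simp_all <;> omega

-- the selection fold tracks pvPad3 of the insertion-sort fold
theorem pv_sel_fold (cs : List (Int × Int)) (h : ∀ p ∈ cs, p.2 < 0) (acc : List (Int × Int)) :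
    cs.foldl pvStep (pvPad3 acc)
      = pvPad3 (cs.foldl (fun a x => PySem.List.insertBy (fun u v => decide (u.2 < v.2)) x a) acc) := by
  induction cs generalizing acc with
  | nil => rfl
  | cons c tl ih =>
    rw [List.foldl_cons, List.foldl_cons, ← pv_step_insert c (h c (by simp)) acc,
      ih (fun p hp => h p (by simp [hp]))]

-- every slot of the padded top-3 of the sorted deficits is ≤ 0
theorem pv_slot_nonpos (cs : List (Int × Int)) (h : ∀ p ∈ cs, p.2 < 0) (i : Nat) :
    ((PySem.List.sorted cs (fun p => p.2)).getD i (0, 0)).2 ≤ 0 := by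
  by_cases hi : i < (PySem.List.sorted cs (fun p => p.2)).length
  · rw [List.getD_eq_getElem _ _ hi]
    have hm : (PySem.List.sorted cs (fun p => p.2))[i] ∈ cs := by
      rw [← PySem.List.mem_sorted cs (fun p => p.2) false]
      exact List.getElem_mem hi
    exact le_of_lt (h _ hm)
  · rw [List.getD_eq_default _ _ (Nat.le_of_not_lt hi)]

-- ===== VERDICT (by name: the statement is the Claim_ definition above) =====
-- A's selection loop (after the dict lookups are resolved) is pvPad3 of the sorted deficits
theorem pv_sel_total (l : List (Int × Int)) (hpre : (l.map Prod.fst).Nodup) :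
    (List.filter (fun p => decide (p.2 < 0)) l).foldl
      (fun (x : (Int × Int) × (Int × Int) × (Int × Int)) (y : Int × Int) =>
        if (PySem.Dict.mk l).getD y.1 0 < x.1.2 then ((y.1, (PySem.Dict.mk l).getD y.1 0), x.1, x.2.1)
        else if (PySem.Dict.mk l).getD y.1 0 < x.2.1.2 then (x.1, (y.1, (PySem.Dict.mk l).getD y.1 0), x.2.1)
        else if (PySem.Dict.mk l).getD y.1 0 < x.2.2.2 then (x.1, x.2.1, (y.1, (PySem.Dict.mk l).getD y.1 0))
        else x)
      (((0:Int), (0:Int)), ((0:Int), (0:Int)), ((0:Int), (0:Int)))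
    = pvPad3 (PySem.List.sorted (List.filter (fun p => decide (p.2 < 0)) l) (fun p => p.2)) := by
  have hneg : ∀ p ∈ List.filter (fun p => decide (p.2 < 0)) l, p.2 < 0 := by
    intro p hp; simpa using List.of_mem_filter hp
  rw [PySem.List.foldl_congr_mem _ _ pvStep _
    (fun acc p hp => by rw [pv_lookup l hpre p (List.mem_of_mem_filter hp)]; rfl)]
  have h0 : (((0:Int), (0:Int)), ((0:Int), (0:Int)), ((0:Int), (0:Int))) = pvPad3 [] := rfl
  rw [h0, pv_sel_fold _ hneg, ← PySem.List.sorted_eq_foldl_insertBy]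

-- ===== VERDICT (by name: the statement is the Claim_ definition above) =====
theorem get_fluctuating_output_spec : Claim_equal_get_fluctuating_output := by
  intro l _ hpre
  unfold Spec_get_fluctuating_output
  simp only [get_fluctuating_output, get_fluctuating_output_alt]
  rw [pv_loop1]
  simp only [List.nil_append, String.empty_append, List.foldl_map]
  rw [pv_sel_total l hpre, pv_pad3_list]
  have hneg : ∀ p ∈ List.filter (fun p => decide (p.2 < 0)) l, p.2 < 0 := by
    intro p hp; simpa using List.of_mem_filter hp
  have hs0 := pv_slot_nonpos _ hneg 0
  have hs1 := pv_slot_nonpos _ hneg 1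
  have hs2 := pv_slot_nonpos _ hneg 2
  simp only [PySem.List.enumerate_cons, PySem.List.enumerate_nil, List.zip, List.zipWith,
    List.foldl_cons, List.foldl_nil, pvPad3]
  norm_num
  simp only [List.getD] at hs0 hs1 hs2
  rw [abs_of_nonpos hs0, abs_of_nonpos hs1, abs_of_nonpos hs2]
  rw [show ("[HIGHEST NET PROFIT DEFICIT] DAY: " : String) = "[HIGHEST NET PROFIT DEFICIT]" ++ " DAY: " from rfl,
    show ("[2ND HIGHEST NET PROFIT DEFICIT] DAY: " : String) = "[2ND HIGHEST NET PROFIT DEFICIT]" ++ " DAY: " from rfl,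
    show ("[3RD HIGHEST NET PROFIT DEFICIT] DAY: " : String) = "[3RD HIGHEST NET PROFIT DEFICIT]" ++ " DAY: " from rfl]
  simp [String.append_assoc]
  congr 1
  exact List.map_congr_left (fun p _ => by simp [pvLine, String.append_assoc])
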